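-- pv_equiv track=rewrite | github.com/itLovaz/rasa-pizza-bot | actions/utils.py | get_order_items_string
-- ===== SOURCE A (Python) =====
-- def get_order_items_string(items):
--     order = {}
--     # count the items
--     for item in items:
--         if item in order.keys():
--             order[item] += 1
--         else:
--             order[item] = 1
--
--     return ", ".join([f"{count} {name}" for name, count in order.items()])
-- ===== SOURCE B (Python) =====
-- def get_order_items_string(items):
--     rest = list(items)
--     parts = []
--     while rest:
--         head = rest[0]
--         new_rest = [x for x in rest if x != head]
--         parts.append(f"{len(rest) - len(new_rest)} {head}")
--         rest = new_rest
--     return ", ".join(parts)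
-- ===== Notes on version B (the rewrite author's own statement) =====
-- stated objective: alternative
-- what changed: Replaces A's single dict-accumulating counting pass by an iterative partition-by-removal: repeatedly take the first element of the shrinking work list, filter out all its occurrences, and derive its count as the length difference, so no counter structure exists at all.
import Mathlib
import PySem

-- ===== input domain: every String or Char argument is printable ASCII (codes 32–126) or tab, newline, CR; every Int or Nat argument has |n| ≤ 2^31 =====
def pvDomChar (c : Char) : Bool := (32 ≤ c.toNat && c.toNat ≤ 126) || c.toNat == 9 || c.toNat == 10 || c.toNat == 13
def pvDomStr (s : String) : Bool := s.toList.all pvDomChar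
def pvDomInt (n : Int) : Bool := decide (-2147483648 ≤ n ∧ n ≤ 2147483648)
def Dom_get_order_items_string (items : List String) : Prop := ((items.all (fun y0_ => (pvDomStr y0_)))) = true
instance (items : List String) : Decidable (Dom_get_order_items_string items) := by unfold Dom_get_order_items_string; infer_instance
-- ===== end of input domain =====

-- B replaces A's single dict-accumulating counting pass by an iterative partition-by-removal
-- over a shrinking work list, with counts obtained as length differences (alternative; not faster).

-- ===== PORT A =====
def get_order_items_string (items : List String) : String :=
  let order := items.foldl
    (fun (d : PySem.Dict String Int) item =>
      if d.contains item then d.insert item (d.getD item 0 + 1)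
      else d.insert item 1)
    PySem.Dict.empty
  PySem.Str.join ", " (order.items.map (fun p => PySem.Int.toStr p.2 ++ " " ++ p.1))

-- ===== PORT B =====
-- the `while rest:` loop of Source B; recursion on the shrinking work list
def pvAltLoop : List String → List String
  | [] => []
  | head :: t =>
    (PySem.Int.toStr ((t.length + 1 - (t.filter (fun x => x ≠ head)).length : Nat) : Int) ++ " " ++ head)
      :: pvAltLoop (t.filter (fun x => x ≠ head))
termination_by l => l.length
decreasing_by
  simp only [List.length_unattach, List.length_cons]
  exact Nat.lt_succ_of_le (le_trans (List.length_filter_le _ _) (le_of_eq List.length_attach))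

def get_order_items_string_alt (items : List String) : String :=
  PySem.Str.join ", " (pvAltLoop items)

-- ===== PRECONDITION & SPEC =====
def Spec_get_order_items_string (items : List String) (out : String) : Prop := out = get_order_items_string_alt items
instance (items : List String) (out : String) : Decidable (Spec_get_order_items_string items out) := by unfold Spec_get_order_items_string; infer_instance

-- ===== CLAIM (what is proved, stated in full; the proofs are below) =====
def Claim_equal_get_order_items_string : Prop := ∀ (items : List String), Dom_get_order_items_string items → Spec_get_order_items_string items (get_order_items_string items)

-- ===== LEMMAS AND PROOFS =====

-- A's branching update is, in both branches, `insert x (getD x 0 + 1)`.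
theorem pv_stepA_eq (d : PySem.Dict String Int) (x : String) :
    (if d.contains x then d.insert x (d.getD x 0 + 1) else d.insert x 1)
      = d.insert x (d.getD x 0 + 1) := by
  by_cases h : d.contains x = true
  · simp [h]
  · have h' : d.contains x = false := by simpa using h
    rw [if_neg (by simp [h']), PySem.Dict.getD_of_not_contains (h := h')]
    norm_num

theorem pv_fold_congr (l : List String) (d : PySem.Dict String Int) :
    l.foldl (fun d x => if d.contains x then d.insert x (d.getD x 0 + 1) else d.insert x 1) d
      = l.foldl (fun d x => d.insert x (d.getD x 0 + 1)) d := by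
  induction l generalizing d with
  | nil => rfl
  | cons x xs ih =>
    simp only [List.foldl_cons]
    rw [pv_stepA_eq]
    exact ih _

-- B's filter predicate, in simp-normal form
theorem pv_pred (h : String) :
    (fun x : String => decide (x ≠ h)) = (fun x => !decide (x = h)) := by
  funext x; by_cases hx : x = h <;> simp [hx]

-- filtering an element away does not change the foldl-add accumulation when it is already present
theorem pv_foldl_add_filter (l : List String) (s : PySem.Set String) (h : String)
    (hmem : h ∈ s) :
    l.foldl PySem.Set.add s = (l.filter (fun x => !decide (x = h))).foldl PySem.Set.add s := by
  induction l generalizing s with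
  | nil => rfl
  | cons x t ih =>
    by_cases hx : x = h
    · subst hx
      have hadd : PySem.Set.add s x = s := by simp [PySem.Set.add, hmem]
      simp only [List.foldl_cons, hadd, List.filter_cons]
      simpa using ih s hmem
    · have hadd : h ∈ PySem.Set.add s x := by
        unfold PySem.Set.add
        split
        · exact hmem
        · exact List.mem_append_left _ hmem
      simp only [List.foldl_cons, List.filter_cons, hx, decide_false, Bool.not_false,
        if_true]
      exact ih _ hadd

-- pulling a fresh first element out of the accumulator
theorem pv_foldl_add_cons (l : List String) (a : String) (s : List String)
    (hal : a ∉ l) (has : a ∉ s) :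
    l.foldl PySem.Set.add (a :: s) = a :: l.foldl PySem.Set.add s := by
  induction l generalizing s with
  | nil => rfl
  | cons x t ih =>
    have hax : x ≠ a := fun h => hal (h ▸ List.mem_cons_self ..)
    have hat : a ∉ t := fun h => hal (List.mem_cons_of_mem _ h)
    by_cases hs : x ∈ s
    · have h1 : PySem.Set.add (a :: s) x = a :: s := by
        simp [PySem.Set.add, List.mem_cons, hs]
      have h2 : PySem.Set.add s x = s := by simp [PySem.Set.add, hs]
      rw [List.foldl_cons, h1, List.foldl_cons, h2]
      exact ih _ hat has
    · have h1 : PySem.Set.add (a :: s) x = a :: (s ++ [x]) := by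
        simp [PySem.Set.add, List.mem_cons, hs, hax]
      have h2 : PySem.Set.add s x = s ++ [x] := by simp [PySem.Set.add, hs]
      have has' : a ∉ s ++ [x] := by
        simp [List.mem_append, has, Ne.symm hax]
      rw [List.foldl_cons, h1, List.foldl_cons, h2]
      exact ih _ hat has'

theorem pv_dedup_cons (h : String) (t : List String) :
    PySem.List.dedup (h :: t) = h :: PySem.List.dedup (t.filter (fun x => !decide (x = h))) := by
  unfold PySem.List.dedup PySem.Set.ofList
  have h0 : List.foldl PySem.Set.add PySem.Set.empty (h :: t)
      = t.foldl PySem.Set.add [h] := by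
    simp [PySem.Set.add, PySem.Set.empty]
  rw [h0, pv_foldl_add_filter t [h] h (by simp)]
  refine pv_foldl_add_cons _ h [] ?_ (by simp)
  intro hm
  have := List.of_mem_filter hm
  simp at this

theorem pv_count_head (h : String) (t : List String) :
    t.length + 1 - (t.filter (fun x => !decide (x = h))).length = (h :: t).count h := by
  have key : (t.filter (fun x => !decide (x = h))).length + t.count h = t.length := by
    induction t with
    | nil => simp
    | cons x xs ih =>
      by_cases hx : x = h
      · subst hx
        simp only [List.filter_cons, List.count_cons]
        simp
        omega
      · simp only [List.filter_cons, List.count_cons, hx, decide_false, Bool.not_false,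
          if_true]
        simp [hx]
        omega
  have hle : (t.filter (fun x => !decide (x = h))).length ≤ t.length := List.length_filter_le _ _
  simp
  omega

theorem pv_count_filter_ne (h name : String) (t : List String) (hne : name ≠ h) :
    (t.filter (fun x => !decide (x = h))).count name = t.count name := by
  induction t with
  | nil => rfl
  | cons x xs ih =>
    by_cases hx : x = h
    · subst hx
      simp only [List.filter_cons]
      simp [Ne.symm hne, ih]
    · simp only [List.filter_cons, hx, decide_false, Bool.not_false, if_true]
      simp [List.count_cons, ih]

-- B's loop produces exactly the ordered-dedup-with-counts list
theorem pv_altLoop_eq (l : List String) :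
    pvAltLoop l
      = (PySem.List.dedup l).map
          (fun name => PySem.Int.toStr ((l.count name : Nat) : Int) ++ " " ++ name) := by
  induction hn : l.length using Nat.strong_induction_on generalizing l with
  | _ n ih =>
    match l with
    | [] => rw [pvAltLoop.eq_def]; rfl
    | h :: t =>
      have hlt : (t.filter (fun x => !decide (x = h))).length < n := by
        have := List.length_filter_le (fun x => !decide (x = h)) t
        simp only [List.length_cons] at hn
        omega
      rw [pvAltLoop.eq_def]
      simp only [pv_pred]
      rw [pv_dedup_cons, List.map_cons]
      congr 1
      · rw [pv_count_head]
      · rw [ih _ hlt _ rfl]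
        apply List.map_congr_left
        intro name hmem
        have hnm : name ∈ t.filter (fun x => !decide (x = h)) := by
          simpa using (PySem.List.mem_dedup _ _).1 hmem
        have hne : name ≠ h := by
          have := List.of_mem_filter hnm
          simpa using this
        rw [List.count_cons, pv_count_filter_ne h name t hne]
        simp [Ne.symm hne]

-- ===== VERDICT (by name: the statement is the Claim_ definition above) =====
theorem get_order_items_string_spec : Claim_equal_get_order_items_string := by
  intro items _
  show get_order_items_string items = get_order_items_string_alt items
  unfold get_order_items_string get_order_items_string_alt
  have hfold : items.foldl
      (fun (d : PySem.Dict String Int) item =>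
        if d.contains item then d.insert item (d.getD item 0 + 1)
        else d.insert item 1)
      PySem.Dict.empty = PySem.Dict.counter items := by
    rw [← PySem.Dict.foldl_insert_getD_add_one_eq_counter]
    apply pv_fold_congr
  rw [pv_altLoop_eq]
  simp only [hfold, PySem.Dict.items_counter, List.map_map, PySem.List.dedup_eq_ofList]
  rfl
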